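-- pv_equiv track=rewrite | github.com/macaron-software/software-factory | platform/traceability/chain.py | _build_layer_coverage
-- ===== SOURCE A (Python) =====
-- _TRACE_LAYER_KEYS = (
--     "persona",
--     "ihm",
--     "code",
--     "tu",
--     "e2e",
--     "crud",
--     "rbac",
--     "screens",
--     "nft",
-- )
--
-- def _build_layer_coverage(features: list[dict]) -> dict[str, int]:
--     total = len(features)
--     if total == 0:
--         return {layer: 0 for layer in _TRACE_LAYER_KEYS}
--     return {
--         layer: round(100 * sum(1 for f in features if f.get("layers", {}).get(layer)) / total)
--         for layer in _TRACE_LAYER_KEYS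
--     }
-- ===== SOURCE B (Python) =====
-- _TRACE_LAYER_KEYS = (
--     "persona",
--     "ihm",
--     "code",
--     "tu",
--     "e2e",
--     "crud",
--     "rbac",
--     "screens",
--     "nft",
-- )
--
-- def _build_layer_coverage(features):
--     # Flatten the data: one list of every truthy layer key found in any feature,
--     # driven by each feature's own layers dict, never by the canonical key list.
--     hits = [k for f in features for k, v in f.get("layers", {}).items() if v]
--     total = len(features)
--     if total == 0:
--         return {layer: 0 for layer in _TRACE_LAYER_KEYS}
--     return {layer: round(100 * hits.count(layer) / total) for layer in _TRACE_LAYER_KEYS}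
-- ===== Notes on version B (the rewrite author's own statement) =====
-- stated objective: alternative
-- what changed: A scans the whole feature list once per canonical layer key (nine per-key generator sums over f.get('layers').get(layer)); B never probes features by key: it flattens the features into a single list of truthy layer keys by iterating each feature's own layers.items(), then renders each percentage from hits.count(layer).
import Mathlib
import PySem

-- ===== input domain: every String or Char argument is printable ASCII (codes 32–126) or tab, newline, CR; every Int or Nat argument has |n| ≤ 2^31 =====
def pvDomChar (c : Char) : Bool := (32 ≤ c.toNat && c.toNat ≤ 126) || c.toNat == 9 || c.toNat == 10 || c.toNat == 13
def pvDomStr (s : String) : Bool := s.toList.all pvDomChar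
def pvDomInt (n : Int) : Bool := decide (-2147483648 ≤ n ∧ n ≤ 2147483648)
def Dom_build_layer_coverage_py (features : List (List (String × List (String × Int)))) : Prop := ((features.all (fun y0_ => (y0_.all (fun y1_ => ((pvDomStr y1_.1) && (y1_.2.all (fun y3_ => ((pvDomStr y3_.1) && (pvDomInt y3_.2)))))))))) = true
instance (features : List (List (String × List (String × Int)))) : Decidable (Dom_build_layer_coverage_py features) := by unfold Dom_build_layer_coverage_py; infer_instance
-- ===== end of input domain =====

-- B replaces A's nine per-layer scans of the feature list by flattening each feature's own
-- layers.items() into one list of truthy layer keys and counting that list per canonical key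
-- (alternative decomposition, same asymptotic cost).

-- shared context: the canonical layer keys (module constant _TRACE_LAYER_KEYS)
def pvLayerKeys : List String :=
  ["persona", "ihm", "code", "tu", "e2e", "crud", "rbac", "screens", "nft"]

-- truthiness of layers.get(layer) for an int-valued dict: present and nonzero
def pvTruthyL (layers : List (String × Int)) (layer : String) : Bool :=
  (PySem.Dict.mk layers).getD layer 0 != 0

-- exact integer form of Python's round(100*c/total) (c = a count, 0 ≤ c ≤ total):
-- round-half-even of the rational (100*c)/total.  Exact: the quotient is ≤ 100, the
-- float division is correctly rounded, and a non-half-integer quotient is at least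
-- 1/(2*total) > 2^-46 away from a half-integer, so the float round never flips.
def pyRoundRatio (num den : Int) : Int :=
  let q := PySem.Int.floordiv num den
  let r := PySem.Int.mod num den
  if 2 * r < den then q
  else if 2 * r > den then q + 1
  else if q % 2 = 0 then q else q + 1

-- ===== PORT A =====
def build_layer_coverage_py (features : List (List (String × List (String × Int)))) : List (String × Int) :=
  let total : Int := features.length
  if total = 0 then
    pvLayerKeys.map (fun layer => (layer, (0 : Int)))
  else
    pvLayerKeys.map (fun layer =>
      (layer, pyRoundRatio
        (100 * (features.foldl
          (fun acc f => if pvTruthyL ((PySem.Dict.mk f).getD "layers" []) layer then acc + 1 else acc)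
          (0 : Int)))
        total))

-- ===== PORT B =====
-- layers.items() of a Python dict given as an association list: under the convention
-- 'lookup = first match', the dict's items are the FIRST occurrence of each key, in
-- first-occurrence order (exact: a Python dict has unique keys).
def pvItemsAux : List (String × Int) → List String → List (String × Int)
  | [], _ => []
  | (k, v) :: rest, seen =>
      if k ∈ seen then pvItemsAux rest seen else (k, v) :: pvItemsAux rest (k :: seen)

-- the inner comprehension for one feature f: the truthy keys of f.get("layers", {}).items()
def pvHitsOf (f : List (String × List (String × Int))) : List String :=
  ((pvItemsAux ((PySem.Dict.mk f).getD "layers" []) []).filter (fun p => p.2 != 0)).map (·.1)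

def build_layer_coverage_py_alt (features : List (List (String × List (String × Int)))) : List (String × Int) :=
  let hits : List String := features.flatMap pvHitsOf
  let total : Int := features.length
  if total = 0 then
    pvLayerKeys.map (fun layer => (layer, (0 : Int)))
  else
    pvLayerKeys.map (fun layer =>
      (layer, pyRoundRatio (100 * (hits.count layer : Int)) total))

-- ===== PRECONDITION & SPEC =====
def Spec_build_layer_coverage_py (features : List (List (String × List (String × Int)))) (out : List (String × Int)) : Prop := out = build_layer_coverage_py_alt features
instance (features : List (List (String × List (String × Int)))) (out : List (String × Int)) : Decidable (Spec_build_layer_coverage_py features out) := by unfold Spec_build_layer_coverage_py; infer_instance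

-- ===== CLAIM (what is proved, stated in full; the proofs are below) =====
def Claim_equal_build_layer_coverage_py : Prop := ∀ (features : List (List (String × List (String × Int)))), Dom_build_layer_coverage_py features → Spec_build_layer_coverage_py features (build_layer_coverage_py features)

-- ===== LEMMAS AND PROOFS =====

-- A's counting fold is countP
theorem pv_foldA_countP (p : List (String × List (String × Int)) → Bool)
    (features : List (List (String × List (String × Int)))) (a : Int) :
    features.foldl (fun acc f => if p f then acc + 1 else acc) a
      = a + (features.countP p : Int) := by
  induction features generalizing a with
  | nil => simp
  | cons f fs ih =>
    simp only [List.foldl_cons, List.countP_cons, ih]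
    split <;> simp_all
    ring

-- one feature's truthy-key list contains k once iff the first match for k is truthy and k unseen
theorem pv_itemsAux_count (xs : List (String × Int)) (k : String) (seen : List String) :
    (((pvItemsAux xs seen).filter (fun p => p.2 != 0)).map (·.1)).count k
      = if k ∈ seen then 0 else if (PySem.Dict.mk xs).getD k 0 != 0 then 1 else 0 := by
  induction xs generalizing seen with
  | nil =>
    have h0 : ({ items := [] } : PySem.Dict String Int).getD k 0 = 0 := rfl
    simp [pvItemsAux, h0]
  | cons q rest ih =>
    obtain ⟨k0, v⟩ := q
    by_cases hk : k = k0
    · subst hk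
      have hget : (PySem.Dict.mk ((k, v) :: rest)).getD k 0 = v := by
        simp [PySem.Dict.getD_eq_get?_getD, PySem.Dict.get?_mk_cons]
      rw [pvItemsAux]
      by_cases hs : k ∈ seen
      · rw [if_pos hs, ih, if_pos hs, if_pos hs]
      · rw [if_neg hs, if_neg hs, hget]
        by_cases hv : ((v : Int) != 0) = true
        · simp [hv, ih]
        · simp [hv, ih]
    · have hne : (k0 == k) = false := by simpa using fun e => hk e.symm
      have hget : (PySem.Dict.mk ((k0, v) :: rest)).getD k 0 = (PySem.Dict.mk rest).getD k 0 := by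
        simp [PySem.Dict.getD_eq_get?_getD, PySem.Dict.get?_mk_cons, hne]
      rw [pvItemsAux, hget]
      by_cases hs : k0 ∈ seen
      · rw [if_pos hs, ih]
      · rw [if_neg hs]
        by_cases hv : ((v : Int) != 0) = true
        · simp [hv, ih, hk, List.mem_cons,
                (show ¬k0 = k from fun e => hk e.symm)]
        · simp [hv, ih, hk, List.mem_cons]

-- the flattened hits list counts k exactly countP-many times
theorem pv_hits_count_total (features : List (List (String × List (String × Int)))) (k : String) :
    ((features.flatMap pvHitsOf).count k : Int)
      = (features.countP (fun f => pvTruthyL ((PySem.Dict.mk f).getD "layers" []) k) : Int) := by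
  induction features with
  | nil => simp
  | cons f fs ih =>
    rw [List.flatMap_cons, List.count_append, List.countP_cons]
    have hone : (pvHitsOf f).count k
        = if pvTruthyL ((PySem.Dict.mk f).getD "layers" []) k then 1 else 0 := by
      unfold pvHitsOf pvTruthyL
      simpa using pv_itemsAux_count ((PySem.Dict.mk f).getD "layers" []) k []
    rw [hone]
    push_cast at ih ⊢
    by_cases ht : pvTruthyL ((PySem.Dict.mk f).getD "layers" []) k = true
    · simp [ht, ih]; ring
    · simp [ht, ih]

-- ===== VERDICT (by name: the statement is the Claim_ definition above) =====
theorem build_layer_coverage_py_spec : Claim_equal_build_layer_coverage_py := by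
  intro features _
  unfold Spec_build_layer_coverage_py build_layer_coverage_py build_layer_coverage_py_alt
  by_cases h0 : (features.length : Int) = 0
  · simp [h0]
  · simp only [h0, if_false]
    apply List.map_congr_left
    intro layer _
    rw [pv_foldA_countP (fun f => pvTruthyL ((PySem.Dict.mk f).getD "layers" []) layer),
        pv_hits_count_total features layer]
    simp
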